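-- pv_equiv track=rewrite | github.com/asadwaheed1/personal_ai_employee | src/orchestrator/skills/update_dashboard.py | _update_summary
-- ===== SOURCE A (Python) =====
-- def _update_summary(content: str, summary: str) -> str:
--     """Update the summary section"""
--     if "## Summary" in content:
--         # Replace existing summary
--         lines = content.split('\n')
--         for i, line in enumerate(lines):
--             if line.startswith("## Summary"):
--                 # Find the next section or end
--                 end_pos = len(lines)
--                 for j in range(i+1, len(lines)):
--                     if lines[j].startswith('#'):
--                         end_pos = j
--                         break
--
--                 # Replace summary content
--                 lines[i+1:end_pos] = [f"\n{summary}\n"]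
--                 break
--
--         content = '\n'.join(lines)
--     else:
--         # Add new summary section
--         content += f"\n\n## Summary\n\n{summary}"
--
--     return content
-- ===== SOURCE B (Python) =====
-- def _update_summary(content: str, summary: str) -> str:
--     """Update the summary section (single-pass state machine)."""
--     if "## Summary" not in content:
--         return content + f"\n\n## Summary\n\n{summary}"
--     out = []
--     state = 0  # 0 = copying before the heading, 1 = skipping old body, 2 = copying after
--     for line in content.split('\n'):
--         if state == 0:
--             out.append(line)
--             if line.startswith("## Summary"):
--                 out.append(f"\n{summary}\n")
--                 state = 1
--         elif state == 1:
--             if line.startswith('#'):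
--                 out.append(line)
--                 state = 2
--             # else: drop the old summary body line
--         else:
--             out.append(line)
--     return '\n'.join(out)
-- ===== Notes on version B (the rewrite author's own statement) =====
-- stated objective: simpler
-- what changed: Replaces A's find-index + nested next-heading scan + slice assignment with a single forward state-machine pass (copy / skip-old-body / copy-rest) that builds the output list in one traversal.
import Mathlib
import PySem

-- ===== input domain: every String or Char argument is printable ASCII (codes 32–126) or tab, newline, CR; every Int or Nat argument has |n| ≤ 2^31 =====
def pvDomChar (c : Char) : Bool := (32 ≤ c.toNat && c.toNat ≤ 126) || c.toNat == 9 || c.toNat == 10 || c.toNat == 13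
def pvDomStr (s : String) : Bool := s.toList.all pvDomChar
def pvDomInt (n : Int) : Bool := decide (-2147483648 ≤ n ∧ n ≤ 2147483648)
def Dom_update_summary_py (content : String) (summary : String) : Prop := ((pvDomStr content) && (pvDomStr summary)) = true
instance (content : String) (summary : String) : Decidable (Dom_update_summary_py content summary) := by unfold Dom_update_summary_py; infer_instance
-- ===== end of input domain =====

-- B replaces A's find-index + nested next-heading scan + slice assignment with one
-- forward state-machine pass; objective: simpler. Proved: A = B on all inputs in Dom.


-- ===== PORT A =====
-- inner loop 'for j in range(i+1, len(lines)): if lines[j].startswith("#"): end_pos = j; break':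
-- offset (within the lines after i) of the first line starting with '#', or the number of
-- remaining lines if there is none (end_pos = len(lines)).
def updA_findHash : List String → Nat
  | [] => 0
  | l :: rs => if PySem.Str.startswith l "#" then 0 else updA_findHash rs + 1

-- outer loop 'for i, line in enumerate(lines): …; break', carrying the already-scanned
-- prefix (reversed); on the first "## Summary" line it performs the slice assignment
-- lines[i+1:end_pos] = ["\n" + summary + "\n"] and breaks.
def updA_scan (pre : List String) (rest : List String) (summary : String) : List String :=
  match rest with
  | [] => pre.reverse
  | l :: rs =>
    if PySem.Str.startswith l "## Summary" then
      pre.reverse ++ [l, "\n" ++ summary ++ "\n"] ++ rs.drop (updA_findHash rs)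
    else
      updA_scan (l :: pre) rs summary

def update_summary_py (content : String) (summary : String) : String :=
  if PySem.Str.isIn "## Summary" content then
    -- content.split('\n'); split? is always `some` since the separator "\n" is nonempty
    let lines := (PySem.Str.split? content "\n").getD []
    PySem.Str.join "\n" (updA_scan [] lines summary)
  else
    content ++ "\n\n## Summary\n\n" ++ summary

-- ===== PORT B =====
-- one step of B's state machine: state 0 copies until the "## Summary" heading,
-- state 1 drops the old body until the next '#' line, state 2 copies the rest.
def updB_step (summary : String) (acc : Nat × List String) (line : String) : Nat × List String :=
  if acc.1 = 0 then
    if PySem.Str.startswith line "## Summary" then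
      (1, acc.2 ++ [line, "\n" ++ summary ++ "\n"])
    else
      (0, acc.2 ++ [line])
  else if acc.1 = 1 then
    if PySem.Str.startswith line "#" then (2, acc.2 ++ [line]) else (1, acc.2)
  else
    (acc.1, acc.2 ++ [line])

def update_summary_py_alt (content : String) (summary : String) : String :=
  if PySem.Str.isIn "## Summary" content = false then
    content ++ "\n\n## Summary\n\n" ++ summary
  else
    -- content.split('\n'); split? is always `some` since the separator "\n" is nonempty
    let lines := (PySem.Str.split? content "\n").getD []
    PySem.Str.join "\n" (lines.foldl (updB_step summary) (0, [])).2

-- ===== PRECONDITION & SPEC =====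
def Spec_update_summary_py (content : String) (summary : String) (out : String) : Prop := out = update_summary_py_alt content summary
instance (content : String) (summary : String) (out : String) : Decidable (Spec_update_summary_py content summary out) := by unfold Spec_update_summary_py; infer_instance

-- ===== CLAIM (what is proved, stated in full; the proofs are below) =====
def Claim_equal_update_summary_py : Prop := ∀ (content : String) (summary : String), Dom_update_summary_py content summary → Spec_update_summary_py content summary (update_summary_py content summary)

-- ===== LEMMAS AND PROOFS =====
-- In state 2 the fold copies every remaining line.
theorem updB_fold_state2 (summary : String) (rs : List String) (out : List String) :
    rs.foldl (updB_step summary) (2, out) = (2, out ++ rs) := by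
  induction rs generalizing out with
  | nil => simp
  | cons l rs ih => simp [updB_step, ih]

-- In state 1 the fold drops lines up to (not including) the first '#' line, then copies.
theorem updB_fold_state1 (summary : String) (rs : List String) (out : List String) :
    (rs.foldl (updB_step summary) (1, out)).2 = out ++ rs.drop (updA_findHash rs) := by
  induction rs generalizing out with
  | nil => simp
  | cons l rs ih =>
    by_cases h : PySem.Str.startswith l "#" = true <;> simp at h <;>
      simp [updB_step, h, updA_findHash, updB_fold_state2, ih]

-- In state 0 the fold computes exactly what A's outer loop computes.
theorem updB_fold_state0 (summary : String) (rest : List String) (pre : List String) :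
    (rest.foldl (updB_step summary) (0, pre.reverse)).2 = updA_scan pre rest summary := by
  induction rest generalizing pre with
  | nil => simp [updA_scan]
  | cons l rs ih =>
    by_cases h : PySem.Str.startswith l "## Summary" = true <;> simp at h
    · simp [updB_step, h, updA_scan, updB_fold_state1]
    · have := ih (l :: pre)
      simpa [updB_step, h, updA_scan] using this

-- ===== VERDICT (by name: the statement is the Claim_ definition above) =====
theorem update_summary_py_spec : Claim_equal_update_summary_py := by
  intro content summary _
  unfold Spec_update_summary_py update_summary_py update_summary_py_alt
  by_cases h : PySem.Str.isIn "## Summary" content = true <;> simp at h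
  · have hf := updB_fold_state0 summary ((PySem.Str.split? content "\n").getD []) []
    simp only [List.reverse_nil] at hf
    simp [h, hf]
  · simp [h]
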